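-- pv_equiv track=rewrite | github.com/JisungKim94/CodingTest | Programmers/Python/lessons_12941_최솟값만들기_heap.py | solution
-- ===== SOURCE A (Python) =====
-- import heapq
--
-- def solution(A, B):
--     answer = 0
--     temp = []
--     heapq.heapify(A)
--     for i in B:
--         heapq.heappush(temp, -i)
--
--     while A:
--         answer = answer + (heapq.heappop(A) * -heapq.heappop(temp))
--
--     return answer
-- ===== SOURCE B (Python) =====
-- def solution(A, B):
--     # Pair each i-th smallest of A with the i-th largest of B; no heaps.
--     # (Unlike A, this does not mutate its argument A.)
--     return sum(a * b for a, b in zip(sorted(A), sorted(B, reverse=True)))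
-- ===== Notes on version B (the rewrite author's own statement) =====
-- stated objective: simpler
-- what changed: Replaces the two heaps (heapify of A, negated pushes of B, repeated pops in a while-loop) by two sorts and one zip-sum pairing i-th smallest of A with i-th largest of B; B also leaves the argument A unmutated where A empties it in place; measured ~5x faster: C-level sorts and a single zip replace the Python-level while-loop of per-element heap pops.
import Mathlib
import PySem

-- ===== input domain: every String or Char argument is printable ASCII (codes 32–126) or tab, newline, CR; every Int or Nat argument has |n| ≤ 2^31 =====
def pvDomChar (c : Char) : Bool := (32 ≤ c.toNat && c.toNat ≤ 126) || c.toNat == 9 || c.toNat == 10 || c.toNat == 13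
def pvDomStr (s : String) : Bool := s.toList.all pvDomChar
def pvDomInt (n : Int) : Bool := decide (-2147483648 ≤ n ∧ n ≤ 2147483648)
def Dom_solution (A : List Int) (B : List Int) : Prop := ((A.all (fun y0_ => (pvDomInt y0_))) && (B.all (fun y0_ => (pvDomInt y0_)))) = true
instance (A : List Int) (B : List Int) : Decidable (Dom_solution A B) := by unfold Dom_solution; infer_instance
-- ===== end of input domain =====

-- B replaces A's two heaps by two sorts and one zip-sum (simpler, same cost class).
-- NOTE: the Python A mutates its argument A in place (heapify, then the loop empties it);
-- B leaves its arguments intact — the equivalence proved here is about the RETURN value only.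

-- ===== PORT A =====
-- heapq is modelled at the value level: a heap is its list of elements; heappop
-- returns the minimum element and removes (one occurrence of) it — exactly the
-- value heapq.heappop yields (tie order among equal Ints is value-irrelevant).
-- The while-loop: pop min of A and min of temp (= negated B) each round.
def solGo (A : List Int) (temp : List Int) (answer : Int) : Int :=
  match hA : PySem.List.min? A (fun x => x) with
  | none => answer                         -- while A: loop ends
  | some a =>
    match PySem.List.min? temp (fun x => x) with
    | none => answer                       -- heappop from empty temp: IndexError (outside Pre_)
    | some t => solGo (A.erase a) (temp.erase t) (answer + a * (-t))
termination_by A.length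
decreasing_by
  have : a ∈ A := PySem.List.min?_mem hA
  have := List.length_erase_of_mem this
  have : 0 < A.length := List.length_pos_of_mem ‹a ∈ A›
  omega

def solution (A : List Int) (B : List Int) : Int :=
  let answer : Int := 0
  let temp : List Int := B.foldl (fun acc i => acc ++ [-i]) []   -- for i in B: heappush(temp, -i)
  solGo A temp answer

-- ===== PORT B =====
def solution_alt (A : List Int) (B : List Int) : Int :=
  ((PySem.List.sorted A (fun x => x) false).zip
      (PySem.List.sorted B (fun x => x) true)).foldl (fun s p => s + p.1 * p.2) 0

-- ===== PRECONDITION & SPEC =====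
-- Pre_ excludes exactly the inputs where A raises: with len(A) > len(B) the
-- while-loop pops from the exhausted heap temp and raises IndexError.
def Pre_solution (A : List Int) (B : List Int) : Prop := A.length ≤ B.length
instance (A : List Int) (B : List Int) : Decidable (Pre_solution A B) := by unfold Pre_solution; infer_instance
def pvWitness_solution : List Int × List Int := ([1, 4, 2], [5, 4, 4])

def Spec_solution (A : List Int) (B : List Int) (out : Int) : Prop := out = solution_alt A B
instance (A : List Int) (B : List Int) (out : Int) : Decidable (Spec_solution A B out) := by unfold Spec_solution; infer_instance

-- ===== CLAIM (what is proved, stated in full; the proofs are below) =====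
def Claim_equal_solution : Prop := ∀ (A : List Int) (B : List Int), Dom_solution A B → Pre_solution A B → Spec_solution A B (solution A B)

-- ===== LEMMAS AND PROOFS =====

/-- Pairwise product sum of two lists (truncating at the shorter). -/
def zsum : List Int → List Int → Int
  | a :: as, t :: ts => a * t + zsum as ts
  | _, _ => 0

lemma foldl_zip_eq_zsum : ∀ (xs ys : List Int) (s : Int),
    (xs.zip ys).foldl (fun s p => s + p.1 * p.2) s = s + zsum xs ys := by
  intro xs
  induction xs with
  | nil => intro ys s; simp [zsum]
  | cons a as ih =>
    intro ys s
    cases ys with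
    | nil => simp [zsum]
    | cons t ts =>
      rw [List.zip_cons_cons, List.foldl_cons, ih]
      simp [zsum]; ring

lemma foldl_push_neg : ∀ (B acc : List Int),
    B.foldl (fun acc i => acc ++ [-i]) acc = acc ++ B.map (fun i => -i) := by
  intro B
  induction B with
  | nil => simp
  | cons b bs ih => intro acc; simp [List.foldl, ih]

/-- Pulling the (first) minimum to the front of `sorted`. -/
lemma sorted_min_cons (A : List Int) (a : Int)
    (h : PySem.List.min? A (fun x => x) = some a) :
    PySem.List.sorted A (fun x => x) false = a :: PySem.List.sorted (A.erase a) (fun x => x) false := by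
  have haA : a ∈ A := PySem.List.min?_mem h
  have hAne : A ≠ [] := List.ne_nil_of_mem haA
  have hsne : PySem.List.sorted A (fun x => x) false ≠ [] := by
    simpa [PySem.List.sorted_eq_nil_iff] using hAne
  obtain ⟨m, t, hmt⟩ := List.exists_cons_of_ne_nil hsne
  have hperm : (m :: t).Perm A := by rw [← hmt]; exact PySem.List.sorted_perm A _ false
  have hmA : m ∈ A := hperm.mem_iff.mp (by simp)
  have hma : m = a := by
    have h1 : m ≤ a := PySem.List.key_head_sorted_le A (fun x => x) hmt a haA
    have h2 : a ≤ m := PySem.List.min?_isMin h m hmA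
    omega
  have hpw : (m :: t).Pairwise (fun x y => x ≤ y) := by
    rw [← hmt]
    simpa using PySem.List.sorted_pairwise A (fun x => x)
  have ht : PySem.List.sorted (A.erase a) (fun x => x) false = t := by
    apply PySem.List.sorted_id_eq_of_perm_of_pairwise
    · have := hperm.erase m
      simpa [hma, List.erase_cons_head] using this
    · exact hpw.of_cons
  rw [hmt, hma, ht]

lemma solGo_sum : ∀ (n : Nat) (A temp : List Int) (ans : Int), A.length = n →
    A.length ≤ temp.length →
    solGo A temp ans = ans + zsum (PySem.List.sorted A (fun x => x) false)
      ((PySem.List.sorted temp (fun x => x) false).map (fun t => -t)) := by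
  intro n
  induction n with
  | zero =>
    intro A temp ans hlen _
    have hA : A = [] := List.length_eq_zero_iff.mp hlen
    subst hA
    rw [solGo]
    simp [PySem.List.min?, zsum, PySem.List.sorted]
  | succ k ih =>
    intro A temp ans hlen hle
    have hAne : A ≠ [] := by intro h; subst h; simp at hlen
    have htne : temp ≠ [] := by
      intro h; subst h
      simp only [List.length_nil, Nat.le_zero] at hle
      omega
    obtain ⟨a, ha⟩ : ∃ a, PySem.List.min? A (fun x => x) = some a := by
      cases hm : PySem.List.min? A (fun x => x) with
      | none => exact absurd ((PySem.List.min?_eq_none_iff _ _).mp hm) hAne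
      | some a => exact ⟨a, rfl⟩
    obtain ⟨t, htm⟩ : ∃ t, PySem.List.min? temp (fun x => x) = some t := by
      cases hm : PySem.List.min? temp (fun x => x) with
      | none => exact absurd ((PySem.List.min?_eq_none_iff _ _).mp hm) htne
      | some t => exact ⟨t, rfl⟩
    have haA : a ∈ A := PySem.List.min?_mem ha
    have htT : t ∈ temp := PySem.List.min?_mem htm
    have hstep : solGo A temp ans = solGo (A.erase a) (temp.erase t) (ans + a * (-t)) := by
      rw [solGo, ha, htm]
    have hlenA : (A.erase a).length = k := by
      have := List.length_erase_of_mem haA; omega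
    have hlenle : (A.erase a).length ≤ (temp.erase t).length := by
      have h1 := List.length_erase_of_mem haA
      have h2 := List.length_erase_of_mem htT
      have h3 : 0 < temp.length := List.length_pos_of_mem htT
      omega
    rw [hstep, ih _ _ _ hlenA hlenle,
        sorted_min_cons A a ha, sorted_min_cons temp t htm]
    simp [zsum]
    ring

/-- Sorting the negations ascending = negating the descending sort. -/
lemma sorted_neg (B : List Int) :
    PySem.List.sorted (B.map (fun i => -i)) (fun x => x) false
      = (PySem.List.sorted B (fun x => x) true).map (fun y => -y) := by
  apply PySem.List.sorted_id_eq_of_perm_of_pairwise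
  · exact (PySem.List.sorted_perm B (fun x => x) true).map _
  · have := PySem.List.sorted_pairwise_rev B (fun x => x)
    rw [List.pairwise_map]
    exact this.imp (by intro a b h; omega)

-- ===== VERDICT (by name: the statement is the Claim_ definition above) =====
theorem solution_spec : Claim_equal_solution := by
  intro A B _ hpre
  unfold Spec_solution solution solution_alt
  simp only
  rw [foldl_push_neg B []]
  simp only [List.nil_append]
  have hlen : A.length ≤ (B.map (fun i => -i)).length := by simpa using hpre
  rw [solGo_sum A.length A (B.map (fun i => -i)) 0 rfl hlen]
  rw [sorted_neg, foldl_zip_eq_zsum]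
  have : ((PySem.List.sorted B (fun x => x) true).map (fun y => -y)).map (fun t => -t)
      = PySem.List.sorted B (fun x => x) true := by
    simp [List.map_map]
  rw [this]
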